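-- pv_equiv track=rewrite | github.com/ultimateBroK/crypto_agent | crypto_agent.py | lookup_coin
-- ===== SOURCE A (Python) =====
-- from typing import Dict, Any, List, Optional, Tuple
--
-- def lookup_coin(query: str, coins: List[Dict[str, str]]) -> Optional[Dict[str, str]]:
--     """Find a coin by symbol or name."""
--     # Look for exact symbol match (case insensitive)
--     exact_symbol = [c for c in coins if c["symbol"].upper() == query.upper()]
--     if exact_symbol:
--         return exact_symbol[0]
--
--     # Look for exact name match (case insensitive)
--     exact_name = [c for c in coins if c["name"].upper() == query.upper()]
--     if exact_name:
--         return exact_name[0]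
--
--     # Look for partial matches in name
--     partial_name = [c for c in coins if query.upper() in c["name"].upper()]
--     if partial_name:
--         return partial_name[0]
--
--     # Look for partial matches in symbol
--     partial_symbol = [c for c in coins if query.upper() in c["symbol"].upper()]
--     if partial_symbol:
--         return partial_symbol[0]
--
--     return None
-- ===== SOURCE B (Python) =====
-- from typing import Dict, Any, List, Optional
--
-- def lookup_coin(query: str, coins: List[Dict[str, str]]) -> Optional[Dict[str, str]]:
--     """Find a coin by symbol or name, in one pass over the list."""
--     q = query.upper()
--     exact_name = None
--     partial_name = None
--     partial_symbol = None
--     for c in coins: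
--         sym = c["symbol"].upper()
--         name = c["name"].upper()
--         if sym == q:
--             return c
--         if exact_name is None and name == q:
--             exact_name = c
--         if partial_name is None and q in name:
--             partial_name = c
--         if partial_symbol is None and q in sym:
--             partial_symbol = c
--     if exact_name is not None:
--         return exact_name
--     if partial_name is not None:
--         return partial_name
--     return partial_symbol
-- ===== Notes on version B (the rewrite author's own statement) =====
-- stated objective: alternative
-- what changed: Replaces A's four full filter passes (each uppercasing every coin field and the query again) with a single loop that uppercases the query once, returns immediately on an exact symbol match, and records the first exact-name / partial-name / partial-symbol hits in three accumulators resolved by priority after the pass.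
-- outside the precondition, e.g. on lookup_coin('btc', [{'symbol': 'BTC'}]): A returns {'symbol': 'BTC'}, B raises KeyError
import Mathlib
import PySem

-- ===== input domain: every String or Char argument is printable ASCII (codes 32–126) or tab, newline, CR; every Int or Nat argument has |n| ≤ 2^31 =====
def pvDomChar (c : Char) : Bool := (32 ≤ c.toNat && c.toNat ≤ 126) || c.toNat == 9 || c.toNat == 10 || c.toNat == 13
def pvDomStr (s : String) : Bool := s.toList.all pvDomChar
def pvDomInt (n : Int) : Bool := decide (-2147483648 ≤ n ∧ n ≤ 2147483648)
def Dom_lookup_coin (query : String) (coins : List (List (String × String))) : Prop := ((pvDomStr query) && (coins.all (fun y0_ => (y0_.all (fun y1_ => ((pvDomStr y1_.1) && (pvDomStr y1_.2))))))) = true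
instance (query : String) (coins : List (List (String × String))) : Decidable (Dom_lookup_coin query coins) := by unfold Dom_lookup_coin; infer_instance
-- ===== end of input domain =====

-- B is a single pass that uppercases the query once and keeps three priority accumulators,
-- instead of A's four full filter passes; return values proved equal on Pre_.

-- shared accessor: c["symbol"] / c["name"] (Python dict lookup = first match); Pre_ guarantees
-- the key is present, so getD's default is never consulted on admitted inputs.
def pvKey (c : List (String × String)) (k : String) : String :=
  (PySem.Dict.mk c).getD k ""

-- ===== PORT A =====
def lookup_coin (query : String) (coins : List (List (String × String))) : Option (List (String × String)) :=
  let exact_symbol := coins.filter (fun c => PySem.Str.upper (pvKey c "symbol") == PySem.Str.upper query)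
  if exact_symbol.isEmpty = false then exact_symbol[0]?
  else
    let exact_name := coins.filter (fun c => PySem.Str.upper (pvKey c "name") == PySem.Str.upper query)
    if exact_name.isEmpty = false then exact_name[0]?
    else
      let partial_name := coins.filter (fun c => PySem.Str.isIn (PySem.Str.upper query) (PySem.Str.upper (pvKey c "name")))
      if partial_name.isEmpty = false then partial_name[0]?
      else
        let partial_symbol := coins.filter (fun c => PySem.Str.isIn (PySem.Str.upper query) (PySem.Str.upper (pvKey c "symbol")))
        if partial_symbol.isEmpty = false then partial_symbol[0]?
        else none

-- ===== PORT B =====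
-- the for-loop of Source B: state = (exact_name, partial_name, partial_symbol)
def lookupGo (q : String) (cs : List (List (String × String)))
    (en pn ps : Option (List (String × String))) : Option (List (String × String)) :=
  match cs with
  | [] => en.or (pn.or ps)
  | c :: rest =>
    let sym := PySem.Str.upper (pvKey c "symbol")
    let name := PySem.Str.upper (pvKey c "name")
    if sym == q then some c
    else
      lookupGo q rest
        (en.or (if name == q then some c else none))
        (pn.or (if PySem.Str.isIn q name then some c else none))
        (ps.or (if PySem.Str.isIn q sym then some c else none))

def lookup_coin_alt (query : String) (coins : List (List (String × String))) : Option (List (String × String)) :=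
  lookupGo (PySem.Str.upper query) coins none none none

-- ===== PRECONDITION & SPEC =====
-- Pre_ excludes coins missing the "symbol" or "name" key: Python A raises KeyError there on
-- almost all of them, except that A can still return via its exact-symbol pass without ever
-- reading "name" — B (reading both keys coin by coin) raises KeyError on those, so they are excluded.
def Pre_lookup_coin (query : String) (coins : List (List (String × String))) : Prop :=
  ∀ c ∈ coins, (PySem.Dict.mk c).contains "symbol" = true ∧ (PySem.Dict.mk c).contains "name" = true
instance (query : String) (coins : List (List (String × String))) : Decidable (Pre_lookup_coin query coins) := by
  unfold Pre_lookup_coin; infer_instance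

def pvWitness_lookup_coin : String × (List (List (String × String))) :=
  ("btc", [[("symbol", "ETH"), ("name", "Ethereum")], [("symbol", "BTC"), ("name", "Bitcoin")]])

def Spec_lookup_coin (query : String) (coins : List (List (String × String))) (out : Option (List (String × String))) : Prop := out = lookup_coin_alt query coins
instance (query : String) (coins : List (List (String × String))) (out : Option (List (String × String))) : Decidable (Spec_lookup_coin query coins out) := by unfold Spec_lookup_coin; infer_instance

-- ===== CLAIM (what is proved, stated in full; the proofs are below) =====
def Claim_equal_lookup_coin : Prop := ∀ (query : String) (coins : List (List (String × String))), Dom_lookup_coin query coins → Pre_lookup_coin query coins → Spec_lookup_coin query coins (lookup_coin query coins)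

-- ===== LEMMAS AND PROOFS =====

-- "if l: return l[0] else X" = l.head?.or X
theorem pvFirst_or (l : List (List (String × String))) (X : Option (List (String × String))) :
    (if l.isEmpty = false then l[0]? else X) = l.head?.or X := by
  cases l <;> rfl

theorem pvHead_ite_cons {a : Type} (p : Prop) [Decidable p] (c : a) (l : List a) :
    (if p then c :: l else l).head? = (if p then some c else none).or l.head? := by
  split_ifs <;> simp

-- loop invariant: the single pass equals head-of-filter chains merged with the accumulators
theorem lookupGo_eq (q : String) (cs : List (List (String × String)))
    (en pn ps : Option (List (String × String))) :
    lookupGo q cs en pn ps =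
      ((cs.filter (fun c => PySem.Str.upper (pvKey c "symbol") == q)).head?).or
        ((en.or (cs.filter (fun c => PySem.Str.upper (pvKey c "name") == q)).head?).or
          ((pn.or (cs.filter (fun c => PySem.Str.isIn q (PySem.Str.upper (pvKey c "name")))).head?).or
            (ps.or (cs.filter (fun c => PySem.Str.isIn q (PySem.Str.upper (pvKey c "symbol")))).head?))) := by
  induction cs generalizing en pn ps with
  | nil => simp [lookupGo]
  | cons c rest ih =>
    simp only [lookupGo, List.filter_cons, pvHead_ite_cons, ih, Option.or_assoc]
    by_cases hs : (PySem.Str.upper (pvKey c "symbol") == q) = true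
    · simp [hs]
    · simp [hs]

-- ===== VERDICT (by name: the statement is the Claim_ definition above) =====
theorem lookup_coin_spec : Claim_equal_lookup_coin := by
  intro query coins _ _
  unfold Spec_lookup_coin lookup_coin lookup_coin_alt
  simp only [pvFirst_or, lookupGo_eq, Option.none_or, Option.or_none]
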